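-- pv_equiv track=rewrite | github.com/flodiggi/Individual_assignment_4 | server.py | degrees_of_separation
-- ===== SOURCE A (Python) =====
-- def find_all_paths(graph, start, end, path=[]):
--     path = path + [start]
--     if start == end:
--         return [path]
--     if not start in graph:
--         return []
--     paths = []
--     for conn in graph[start]:
--         if conn not in path:
--             newpaths = find_all_paths(graph, conn, end, path)
--             for newpath in newpaths:
--                 paths.append(newpath)
--     return paths
--
-- def degrees_of_separation(graph, start, end):
--     all_paths = find_all_paths(graph, start, end)
--     degrees = None
--     for path in all_paths:
--         steps = 0
--         for step in path:
--             steps += 1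
--         if degrees is None or steps < degrees:
--             degrees = steps
--     return degrees
-- ===== SOURCE B (Python) =====
-- def degrees_of_separation(graph, start, end):
--     # BFS from start; returns the number of nodes on a shortest path, or None.
--     if start == end:
--         return 1
--     visited = {start}
--     frontier = [start]
--     depth = 1
--     while frontier:
--         depth += 1
--         nxt = []
--         for u in frontier:
--             for v in graph.get(u, ()):
--                 if v == end:
--                     return depth
--                 if v not in visited:
--                     visited.add(v)
--                     nxt.append(v)
--         frontier = nxt
--     return None
-- ===== Notes on version B (the rewrite author's own statement) =====
-- stated objective: alternative
-- what changed: Replaces the exhaustive DFS that enumerates every simple path into a list and then scans that list for the shortest with a single level-by-level breadth-first search from start that returns as soon as end is reached (O(V+E) vs worst-case exponential, though a timing run input family did not show a measurable difference).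
import Mathlib
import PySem

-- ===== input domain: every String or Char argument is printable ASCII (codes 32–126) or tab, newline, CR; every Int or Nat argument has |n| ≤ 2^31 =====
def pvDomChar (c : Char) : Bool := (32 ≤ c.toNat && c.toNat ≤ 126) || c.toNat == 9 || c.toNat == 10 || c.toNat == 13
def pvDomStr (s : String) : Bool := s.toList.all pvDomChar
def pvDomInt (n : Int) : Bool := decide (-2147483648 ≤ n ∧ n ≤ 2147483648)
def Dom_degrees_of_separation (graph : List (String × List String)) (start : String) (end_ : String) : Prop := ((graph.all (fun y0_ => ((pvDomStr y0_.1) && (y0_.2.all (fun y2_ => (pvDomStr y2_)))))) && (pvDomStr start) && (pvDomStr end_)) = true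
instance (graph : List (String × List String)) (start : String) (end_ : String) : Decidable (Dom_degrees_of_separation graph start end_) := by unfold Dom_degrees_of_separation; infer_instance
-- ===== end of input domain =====

-- B replaces A's enumeration of every simple path (followed by a min scan) with a single
-- level-by-level BFS from `start`; objective: alternative algorithm, same observable result.

-- ===== PORT A =====
-- find_all_paths(graph, start, end, path): recursion is on `fuel`; the fuel argument only makes the
-- recursion structural — with fuel = graph.length + 1 (as degrees_of_separation passes) the 0 branch
-- is unreachable, because each recursive call appends a fresh dict key to `path`.
def findAllPaths (graph : List (String × List String)) (fuel : Nat) (start end_ : String) (path : List String) : List (List String) :=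
  match fuel with
  | 0 => []
  | Nat.succ fuel =>
    let path := path ++ [start]
    if start = end_ then [path]
    else
      match (PySem.Dict.mk graph).get? start with
      | none => []
      | some conns =>
        conns.foldl (fun paths conn =>
          if conn ∈ path then paths
          else paths ++ findAllPaths graph fuel conn end_ path) []

-- body of the `for path in all_paths:` loop
def degreesStep (degrees : Option Int) (path : List String) : Option Int :=
  let steps := path.foldl (fun s _ => s + 1) (0 : Int)
  match degrees with
  | none => some steps
  | some d => if steps < d then some steps else some d

def degrees_of_separation (graph : List (String × List String)) (start : String) (end_ : String) : Option Int :=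
  let all_paths := findAllPaths graph (graph.length + 1) start end_ []
  all_paths.foldl degreesStep none

-- ===== PORT B =====
-- inner loop `for v in graph.get(u, ()): …` ; returns none on the early `return depth`
def bfsScanAdj (end_ : String) (vs : List String) (st : PySem.Set String × List String) : Option (PySem.Set String × List String) :=
  match vs with
  | [] => some st
  | v :: vs =>
    if v = end_ then none
    else if PySem.Set.contains st.1 v then bfsScanAdj end_ vs st
    else bfsScanAdj end_ vs (PySem.Set.add st.1 v, st.2 ++ [v])

-- outer loop `for u in frontier: …`
def bfsScanFrontier (graph : List (String × List String)) (end_ : String) (us : List String) (st : PySem.Set String × List String) : Option (PySem.Set String × List String) :=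
  match us with
  | [] => some st
  | u :: us =>
    match bfsScanAdj end_ ((PySem.Dict.mk graph).getD u []) st with
    | none => none
    | some st => bfsScanFrontier graph end_ us st

-- `while frontier:` — fuel only makes the loop structural; graph.length + 2 levels always suffice
-- (frontier at depth d is nonempty only if some node is at BFS distance d ≤ #keys + 1).
def bfsLoop (graph : List (String × List String)) (end_ : String) (fuel : Nat) (visited : PySem.Set String) (frontier : List String) (depth : Int) : Option Int :=
  match fuel with
  | 0 => none
  | Nat.succ fuel =>
    match frontier with
    | [] => none
    | _ :: _ =>
      let depth := depth + 1
      match bfsScanFrontier graph end_ frontier (visited, []) with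
      | none => some depth
      | some (visited, nxt) => bfsLoop graph end_ fuel visited nxt depth

def degrees_of_separation_alt (graph : List (String × List String)) (start : String) (end_ : String) : Option Int :=
  if start = end_ then some 1
  else bfsLoop graph end_ (graph.length + 2) (PySem.Set.add PySem.Set.empty start) [start] 1

-- ===== PRECONDITION & SPEC =====
def Spec_degrees_of_separation (graph : List (String × List String)) (start : String) (end_ : String) (out : Option Int) : Prop := out = degrees_of_separation_alt graph start end_
instance (graph : List (String × List String)) (start : String) (end_ : String) (out : Option Int) : Decidable (Spec_degrees_of_separation graph start end_ out) := by unfold Spec_degrees_of_separation; infer_instance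

-- ===== CLAIM (what is proved, stated in full; the proofs are below) =====
def Claim_equal_degrees_of_separation : Prop := ∀ (graph : List (String × List String)) (start : String) (end_ : String), Dom_degrees_of_separation graph start end_ → Spec_degrees_of_separation graph start end_ (degrees_of_separation graph start end_)

-- ===== LEMMAS AND PROOFS =====

-- adjacency relation of the graph (first-match dict lookup, missing key = no successors)
def pvAdj (graph : List (String × List String)) (u v : String) : Prop :=
  v ∈ ((PySem.Dict.mk graph).get? u).getD []

-- a walk from s to v consisting of exactly n nodes
def pvW (graph : List (String × List String)) (s v : String) (n : Nat) : Prop :=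
  ∃ p : List String, List.IsChain (pvAdj graph) p ∧ p.head? = some s ∧ p.getLast? = some v ∧ p.length = n

-- the common specification both ports are proved to satisfy: the minimal walk node-count, or none
def pvSpec (graph : List (String × List String)) (s e : String) (out : Option Int) : Prop :=
  match out with
  | some z => ∃ n : Nat, z = (n : Int) ∧ pvW graph s e n ∧ ∀ m, pvW graph s e m → n ≤ m
  | none => ∀ n, ¬ pvW graph s e n

-- ----- generic walk facts -----

lemma pvW_one (graph : List (String × List String)) (s : String) : pvW graph s s 1 :=
  ⟨[s], by simp, rfl, rfl, rfl⟩

lemma pvW_len_pos {graph : List (String × List String)} {s v : String} {n : Nat}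
    (h : pvW graph s v n) : 1 ≤ n := by
  obtain ⟨p, -, hh, -, hlen⟩ := h
  cases p with
  | nil => simp at hh
  | cons a t => simp [← hlen]

lemma pvW_one_iff {graph : List (String × List String)} {s v : String}
    (h : pvW graph s v 1) : v = s := by
  obtain ⟨p, -, hh, hl, hlen⟩ := h
  obtain ⟨a, rfl⟩ := List.length_eq_one_iff.mp hlen
  simp at hh hl; rw [← hh, ← hl]

lemma pvW_snoc {graph : List (String × List String)} {s u v : String} {n : Nat}
    (h : pvW graph s u n) (ha : pvAdj graph u v) : pvW graph s v (n + 1) := by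
  obtain ⟨p, hc, hh, hl, hlen⟩ := h
  have hpne : p ≠ [] := by rintro rfl; simp at hh
  refine ⟨p ++ [v], ?_, ?_, ?_, ?_⟩
  · rw [List.isChain_append]
    exact ⟨hc, by simp, by intro x hx y hy; simp at hy; subst hy; rw [hl] at hx; simp at hx; subst hx; exact ha⟩
  · rw [List.head?_append_of_ne_nil _ hpne]; exact hh
  · exact List.getLast?_concat
  · simp [hlen]

lemma pvW_unsnoc {graph : List (String × List String)} {s v : String} {n : Nat}
    (hn : 1 ≤ n) (h : pvW graph s v (n + 1)) : ∃ u, pvW graph s u n ∧ pvAdj graph u v := by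
  obtain ⟨p, hc, hh, hl, hlen⟩ := h
  have hpne : p ≠ [] := by rintro rfl; simp at hh
  have hsplit : p.dropLast ++ [p.getLast hpne] = p := List.dropLast_append_getLast hpne
  have hv : p.getLast hpne = v := by
    have := List.getLast?_eq_some_getLast (l := p) hpne
    rw [hl] at this; injection this with h'; exact h'.symm
  have hp : p = p.dropLast ++ [v] := by rw [← hv, hsplit]
  have hqlen : p.dropLast.length = n := by
    have : p.dropLast.length = p.length - 1 := List.length_dropLast; omega
  have hqne : p.dropLast ≠ [] := by
    intro h0; rw [h0] at hqlen; simp at hqlen; omega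
  rw [hp] at hc hh
  rw [List.isChain_append] at hc
  obtain ⟨hcq, -, hedge⟩ := hc
  refine ⟨p.dropLast.getLast hqne, ⟨p.dropLast, hcq, ?_, List.getLast?_eq_some_getLast hqne, hqlen⟩, ?_⟩
  · rwa [List.head?_append_of_ne_nil _ hqne] at hh
  · exact hedge _ (List.getLast?_eq_some_getLast hqne) v rfl

lemma pv_dup_split (l : List String) (h : ¬ l.Nodup) :
    ∃ x a b c, l = a ++ x :: b ++ x :: c := by
  induction l with
  | nil => simp at h
  | cons y t ih =>
    rw [List.nodup_cons] at h
    push_neg at h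
    by_cases hy : y ∈ t
    · obtain ⟨b, c, rfl⟩ := List.append_of_mem hy
      exact ⟨y, [], b, c, rfl⟩
    · obtain ⟨x, a, b, c, rfl⟩ := ih (h hy)
      exact ⟨x, y :: a, b, c, rfl⟩

lemma pv_shorten_aux {graph : List (String × List String)} {s v : String} :
    ∀ (N : Nat) (p : List String), p.length ≤ N →
    List.IsChain (pvAdj graph) p → p.head? = some s → p.getLast? = some v →
    ∃ q : List String, q.Nodup ∧ List.IsChain (pvAdj graph) q ∧ q.head? = some s ∧
      q.getLast? = some v ∧ q.length ≤ p.length := by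
  intro N
  induction N with
  | zero =>
    intro p hN hc hh hl
    cases p with
    | nil => simp at hh
    | cons a t => simp at hN
  | succ N ih =>
    intro p hN hc hh hl
    by_cases hnd : p.Nodup
    · exact ⟨p, hnd, hc, hh, hl, le_refl _⟩
    · obtain ⟨x, a, b, c, rfl⟩ := pv_dup_split p hnd
      have hre : a ++ x :: b ++ x :: c = a ++ ((x :: b) ++ (x :: c)) := by simp
      rw [hre] at hc hh hl
      rw [List.isChain_append] at hc
      obtain ⟨hca, hcr, hedge⟩ := hc
      rw [List.isChain_append] at hcr
      obtain ⟨-, hcxc, -⟩ := hcr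
      have hc' : List.IsChain (pvAdj graph) (a ++ x :: c) := by
        rw [List.isChain_append]
        refine ⟨hca, hcxc, ?_⟩
        intro y hy z hz
        exact hedge y hy z (by simpa using hz)
      have hh' : (a ++ x :: c).head? = some s := by
        cases a with
        | nil => simpa using hh
        | cons a0 a' => simpa using hh
      have hl' : (a ++ x :: c).getLast? = some v := by
        rw [List.getLast?_append] at hl ⊢
        rw [List.getLast?_append] at hl
        obtain ⟨w, hw⟩ : ∃ w, (x :: c).getLast? = some w :=
          ⟨_, List.getLast?_eq_some_getLast (List.cons_ne_nil x c)⟩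
        rw [hw] at hl ⊢
        simpa using hl
      have hlen' : (a ++ x :: c).length ≤ N := by
        simp at hN ⊢; omega
      obtain ⟨q, h1, h2, h3, h4, h5⟩ := ih (a ++ x :: c) hlen' hc' hh' hl'
      exact ⟨q, h1, h2, h3, h4, by simp at h5 ⊢; omega⟩

lemma pv_shorten {graph : List (String × List String)} {s v : String} (p : List String)
    (hc : List.IsChain (pvAdj graph) p) (hh : p.head? = some s) (hl : p.getLast? = some v) :
    ∃ q : List String, q.Nodup ∧ List.IsChain (pvAdj graph) q ∧ q.head? = some s ∧
      q.getLast? = some v ∧ q.length ≤ p.length :=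
  pv_shorten_aux p.length p (le_refl _) hc hh hl

lemma pv_chain_succ {graph : List (String × List String)} (q : List String)
    (hc : List.IsChain (pvAdj graph) q) : ∀ u ∈ q.dropLast, ∃ w, pvAdj graph u w := by
  induction q with
  | nil => simp
  | cons a t ih =>
    cases t with
    | nil => simp
    | cons b t' =>
      rw [List.isChain_cons] at hc
      intro u hu
      rw [List.dropLast_cons_of_ne_nil (List.cons_ne_nil b t')] at hu
      rcases List.mem_cons.mp hu with rfl | hu'
      · exact ⟨b, hc.1 b rfl⟩
      · exact ih hc.2 u hu'

lemma pv_len_bound {graph : List (String × List String)} (q : List String)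
    (hc : List.IsChain (pvAdj graph) q) (hn : q.Nodup) : q.length ≤ graph.length + 1 := by
  have hsub : ∀ u ∈ q.dropLast, u ∈ graph.map (fun y => y.1) := by
    intro u hu
    obtain ⟨w, hw⟩ := pv_chain_succ q hc u hu
    unfold pvAdj at hw
    rcases h : (PySem.Dict.mk graph).get? u with _ | conns
    · rw [h] at hw; simp at hw
    · have := (PySem.Dict.get?_eq_none_iff_not_mem_keys (PySem.Dict.mk graph) u)
      rw [PySem.Dict.keys_mk] at this
      by_contra hmem
      rw [this.mpr hmem] at h; cases h
  have hnd : q.dropLast.Nodup := (List.dropLast_sublist q).nodup hn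
  have h1 : q.dropLast.length = q.dropLast.toFinset.card := (List.toFinset_card_of_nodup hnd).symm
  have h2 : q.dropLast.toFinset ⊆ (graph.map (fun y => y.1)).toFinset := by
    intro x hx
    rw [List.mem_toFinset] at hx ⊢
    exact hsub x hx
  have h3 : (graph.map (fun y => y.1)).toFinset.card ≤ graph.length := by
    calc (graph.map (fun y => y.1)).toFinset.card ≤ (graph.map (fun y => y.1)).length :=
          List.toFinset_card_le _
      _ = graph.length := by simp
  have h4 : q.length ≤ q.dropLast.length + 1 := by
    have : q.dropLast.length = q.length - 1 := List.length_dropLast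
    omega
  have := Finset.card_le_card h2
  omega

lemma pv_exists_minimal (P : Nat → Prop) (h : ∃ n, P n) : ∃ n, P n ∧ ∀ m, P m → n ≤ m := by
  haveI : DecidablePred P := fun n => Classical.propDecidable _
  exact ⟨Nat.find h, Nat.find_spec h, fun m hm => Nat.find_min' h hm⟩

-- ----- A-side: the fold in the main loop is a minimum -----

lemma pv_cnt (p : List String) (a : Int) : p.foldl (fun s _ => s + 1) a = a + p.length := by

  induction p generalizing a with
  | nil => simp
  | cons x t ih => simp [ih]; push_cast; ring

lemma pv_afold_some (l : List (List String)) (d : Int) :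
    l.foldl degreesStep (some d) = some (l.foldl (fun d p => min d ((p.length : Int))) d) := by

  induction l generalizing d with
  | nil => simp
  | cons p t ih =>
    have hstep : degreesStep (some d) p = some (min d ((p.length : Int))) := by
      simp only [degreesStep, pv_cnt, zero_add]
      split_ifs with h <;> simp <;> omega
    simp only [List.foldl_cons, hstep, ih]

lemma pv_foldl_min_spec : ∀ (t : List (List String)) (a : Int),
    (t.foldl (fun d q => min d ((q.length : Int))) a = a ∨
      ∃ q ∈ t, t.foldl (fun d q => min d ((q.length : Int))) a = ((q.length : Int))) ∧
    t.foldl (fun d q => min d ((q.length : Int))) a ≤ a ∧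
    ∀ q ∈ t, t.foldl (fun d q => min d ((q.length : Int))) a ≤ ((q.length : Int)) := by
  intro t
  induction t with
  | nil => intro a; simp
  | cons p t ih =>
    intro a
    simp only [List.foldl_cons]
    obtain ⟨h1, h2, h3⟩ := ih (min a ((p.length : Int)))
    refine ⟨?_, ?_, ?_⟩
    · rcases h1 with h | ⟨q, hq, hval⟩
      · rcases le_or_gt a ((p.length : Int)) with hle | hgt
        · left; rw [h]; omega
        · right; exact ⟨p, by simp, by rw [h]; omega⟩
      · right; exact ⟨q, by simp [hq], hval⟩
    · calc _ ≤ min a ((p.length : Int)) := h2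
        _ ≤ a := min_le_left _ _
    · intro q hq
      rcases List.mem_cons.mp hq with rfl | hq'
      · calc _ ≤ min a ((q.length : Int)) := h2
          _ ≤ _ := min_le_right _ _
      · exact h3 q hq'

-- ----- A-side: the enumerator returns exactly walks, and all nodup ones -----

lemma pv_foldl_if_mem {α : Type} (P : List String → String → Prop) [∀ p c, Decidable (P p c)]
    (g : String → List α) (l : List String) (pth : List String) (x : α) :
    x ∈ l.foldl (fun paths conn => if P pth conn then paths else paths ++ g conn) [] ↔
      ∃ c ∈ l, ¬ P pth c ∧ x ∈ g c := by

  have hfun : (fun (paths : List α) conn => if P pth conn then paths else paths ++ g conn)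
      = (fun paths conn => paths ++ if P pth conn then [] else g conn) := by
    funext paths conn; split_ifs <;> simp
  rw [hfun, PySem.List.foldl_append_eq_flatMap]
  simp only [List.nil_append, List.mem_flatMap]
  constructor
  · rintro ⟨c, hc, hx⟩
    split_ifs at hx with h
    · simp at hx
    · exact ⟨c, hc, h, hx⟩
  · rintro ⟨c, hc, h, hx⟩
    exact ⟨c, hc, by simpa [h] using hx⟩

lemma findAllPaths_sound (graph : List (String × List String)) (e : String) :
    ∀ (fuel : Nat) (s : String) (path p : List String),
      p ∈ findAllPaths graph fuel s e path →
      ∃ q, p = path ++ q ∧ List.IsChain (pvAdj graph) q ∧ q.head? = some s ∧ q.getLast? = some e := by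

  intro fuel
  induction fuel with
  | zero => intro s path p h; simp [findAllPaths] at h
  | succ f ih =>
    intro s path p h
    simp only [findAllPaths] at h
    by_cases hse : s = e
    · subst hse
      simp at h
      exact ⟨[s], by simpa using h, by simp, rfl, rfl⟩
    · rw [if_neg hse] at h
      rcases hget : (PySem.Dict.mk graph).get? s with _ | conns
      · rw [hget] at h; simp at h
      · rw [hget] at h
        rw [pv_foldl_if_mem (fun pth conn => conn ∈ pth)] at h
        obtain ⟨c, hc, hcp, hrec⟩ := h
        obtain ⟨q', rfl, hchain, hhead, hlast⟩ := ih c (path ++ [s]) _ hrec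
        have hq'ne : q' ≠ [] := by rintro rfl; simp at hhead
        refine ⟨s :: q', by simp, ?_, rfl, ?_⟩
        · rw [List.isChain_cons]
          refine ⟨?_, hchain⟩
          intro y hy
          rw [hhead] at hy
          simp at hy; subst hy
          unfold pvAdj; rw [hget]; simpa using hc
        · rw [show s :: q' = [s] ++ q' from rfl, List.getLast?_append, hlast]; rfl

def pvFree (graph : List (String × List String)) (path : List String) : Nat :=
  (((graph.map (fun y => y.1)).toFinset).filter (fun k => k ∉ path)).card

lemma pvFree_step {graph : List (String × List String)} {path : List String} {s : String}
    (hk : s ∈ graph.map (fun y => y.1)) (hs : s ∉ path) :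
    pvFree graph (path ++ [s]) + 1 ≤ pvFree graph path := by

  have hsub : ((graph.map (fun y => y.1)).toFinset).filter (fun k => k ∉ path ++ [s]) ⊆
      ((graph.map (fun y => y.1)).toFinset).filter (fun k => k ∉ path) := by
    intro x hx
    simp only [Finset.mem_filter, List.mem_append, List.mem_singleton] at hx ⊢
    tauto
  have hmem : s ∈ ((graph.map (fun y => y.1)).toFinset).filter (fun k => k ∉ path) := by
    simp only [Finset.mem_filter, List.mem_toFinset]
    exact ⟨hk, hs⟩
  have hnmem : s ∉ ((graph.map (fun y => y.1)).toFinset).filter (fun k => k ∉ path ++ [s]) := by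
    simp [Finset.mem_filter]
  have hlt := Finset.card_lt_card (Finset.ssubset_iff_of_subset hsub |>.mpr ⟨s, hmem, hnmem⟩)
  unfold pvFree
  omega

lemma findAllPaths_complete (graph : List (String × List String)) (e : String) :
    ∀ (q : List String) (fuel : Nat) (s : String) (path : List String),
      List.IsChain (pvAdj graph) q → q.Nodup → q.head? = some s → q.getLast? = some e →
      (∀ x ∈ q, x ∉ path) → pvFree graph path + 1 ≤ fuel →
      path ++ q ∈ findAllPaths graph fuel s e path := by
  intro q
  induction q with
  | nil => intro fuel s path _ _ hh; simp at hh
  | cons s0 rest ih =>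
    intro fuel s path hchain hnd hh hl hdisj hfuel
    have hs0 : s0 = s := by simpa using hh
    rw [← hs0] at *
    obtain ⟨f, rfl⟩ : ∃ f, fuel = f + 1 := ⟨fuel - 1, by omega⟩
    simp only [findAllPaths]
    by_cases hse : s0 = e
    · have hrest : rest = [] := by
        rcases rest with _ | ⟨r0, rest'⟩
        · rfl
        · exfalso
          rw [List.getLast?_cons_cons] at hl
          have hmem : e ∈ (r0 :: rest') := List.mem_of_getLast? hl
          rw [List.nodup_cons] at hnd
          exact hnd.1 (by rw [hse]; exact hmem)
      subst hrest
      rw [if_pos hse]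
      rw [hse]
      simp [hse]
    · rw [if_neg hse]
      rcases rest with _ | ⟨v, rest'⟩
      · exfalso; simp at hl; exact hse hl
      · have hadj : pvAdj graph s0 v := by
          rw [List.isChain_cons] at hchain
          exact hchain.1 v rfl
        unfold pvAdj at hadj
        rcases hget : (PySem.Dict.mk graph).get? s0 with _ | conns
        · rw [hget] at hadj; simp at hadj
        · rw [hget] at hadj; simp at hadj
          show path ++ s0 :: v :: rest' ∈ List.foldl
            (fun paths conn => if conn ∈ path ++ [s0] then paths
              else paths ++ findAllPaths graph f conn e (path ++ [s0])) [] conns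
          rw [pv_foldl_if_mem (fun pth conn => conn ∈ pth)]
          refine ⟨v, hadj, ?_, ?_⟩
          · simp only [List.mem_append, List.mem_singleton]
            push_neg
            refine ⟨hdisj v (by simp), ?_⟩
            intro hvs
            rw [List.nodup_cons] at hnd
            exact hnd.1 (by simp [hvs])
          · have hrw : path ++ s0 :: v :: rest' = (path ++ [s0]) ++ (v :: rest') := by simp
            rw [hrw]
            apply ih f v (path ++ [s0])
            · rw [List.isChain_cons] at hchain; exact hchain.2
            · rw [List.nodup_cons] at hnd; exact hnd.2
            · rfl
            · rw [show s0 :: v :: rest' = [s0] ++ (v :: rest') from rfl, List.getLast?_append] at hl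
              obtain ⟨w, hw⟩ : ∃ w, (v :: rest').getLast? = some w :=
                ⟨_, List.getLast?_eq_some_getLast (List.cons_ne_nil v rest')⟩
              rw [hw] at hl ⊢
              simpa using hl
            · intro x hx
              simp only [List.mem_append, List.mem_singleton]
              push_neg
              refine ⟨hdisj x (by simp [hx]), ?_⟩
              rintro rfl
              rw [List.nodup_cons] at hnd
              exact hnd.1 hx
            · have hkey : s0 ∈ graph.map (fun y => y.1) := by
                have := (PySem.Dict.get?_eq_none_iff_not_mem_keys (PySem.Dict.mk graph) s0)
                rw [PySem.Dict.keys_mk] at this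
                by_contra hmem
                rw [this.mpr hmem] at hget; cases hget
              have hsnp : s0 ∉ path := hdisj s0 (by simp)
              have := pvFree_step (path := path) hkey hsnp
              omega

lemma degrees_spec_A (graph : List (String × List String)) (s e : String) :
    pvSpec graph s e (degrees_of_separation graph s e) := by
  have hA : degrees_of_separation graph s e =
      List.foldl degreesStep none (findAllPaths graph (graph.length + 1) s e []) := rfl
  have hfuel0 : pvFree graph [] + 1 ≤ graph.length + 1 := by
    have h1 : pvFree graph [] ≤ (graph.map (fun y => y.1)).toFinset.card :=
      Finset.card_le_card (Finset.filter_subset _ _)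
    have h2 : (graph.map (fun y => y.1)).toFinset.card ≤ (graph.map (fun y => y.1)).length :=
      List.toFinset_card_le _
    have h3 : (graph.map (fun y => y.1)).length = graph.length := by simp
    omega
  have hfind : ∀ m, pvW graph s e m →
      ∃ q', q' ∈ findAllPaths graph (graph.length + 1) s e [] ∧ q'.length ≤ m := by
    intro m hm
    obtain ⟨p, hc, hh, hl, hlen⟩ := hm
    obtain ⟨q', hnd, hc', hh', hl', hle⟩ := pv_shorten p hc hh hl
    have := findAllPaths_complete graph e q' (graph.length + 1) s [] hc' hnd hh' hl'
      (by intro x _; simp) hfuel0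
    exact ⟨q', by simpa using this, by omega⟩
  rcases hL : findAllPaths graph (graph.length + 1) s e [] with _ | ⟨p, t⟩
  · rw [show pvSpec graph s e (degrees_of_separation graph s e) =
        pvSpec graph s e none from by rw [hA, hL]; rfl]
    intro n hn
    obtain ⟨q', hq', -⟩ := hfind n hn
    rw [hL] at hq'
    simp at hq'
  · have hstep : degreesStep none p = some ((p.length : Int)) := by
      simp [degreesStep, pv_cnt]
    have hval : degrees_of_separation graph s e =
        some (t.foldl (fun d q => min d ((q.length : Int))) ((p.length : Int))) := by
      rw [hA, hL, List.foldl_cons, hstep, pv_afold_some]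
    rw [show pvSpec graph s e (degrees_of_separation graph s e) =
        pvSpec graph s e (some (t.foldl (fun d q => min d ((q.length : Int))) ((p.length : Int))))
        from by rw [hval]]
    obtain ⟨h1, h2, h3⟩ := pv_foldl_min_spec t ((p.length : Int))
    have hmem : ∃ p0 ∈ p :: t,
        t.foldl (fun d q => min d ((q.length : Int))) ((p.length : Int)) = ((p0.length : Int)) := by
      rcases h1 with h | ⟨q, hq, hval2⟩
      · exact ⟨p, by simp, h⟩
      · exact ⟨q, by simp [hq], hval2⟩
    obtain ⟨p0, hp0mem, hp0⟩ := hmem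
    have hp0L : p0 ∈ findAllPaths graph (graph.length + 1) s e [] := by rw [hL]; exact hp0mem
    obtain ⟨q0, hq0eq, hc0, hh0, hl0⟩ := findAllPaths_sound graph e _ s [] p0 hp0L
    have hq0 : p0 = q0 := by simpa using hq0eq
    refine ⟨p0.length, by exact_mod_cast hp0, ?_, ?_⟩
    · exact ⟨q0, hc0, hh0, hl0, by rw [hq0]⟩
    · intro m hm
      obtain ⟨q2, hq2mem, hq2len⟩ := hfind m hm
      rw [hL] at hq2mem
      have hle : t.foldl (fun d q => min d ((q.length : Int))) ((p.length : Int)) ≤ ((q2.length : Int)) := by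
        rcases List.mem_cons.mp hq2mem with rfl | h
        · exact h2
        · exact h3 _ h
      rw [hp0] at hle
      have h4 : p0.length ≤ q2.length := by exact_mod_cast hle
      omega

-- ----- B-side: scan characterisations and BFS invariants -----

lemma scanAdj_none_iff (e : String) : ∀ (vs : List String) (st : PySem.Set String × List String),
    bfsScanAdj e vs st = none ↔ e ∈ vs := by
  intro vs
  induction vs with
  | nil => intro st; simp [bfsScanAdj]
  | cons v vs ih =>
    intro st
    by_cases h1 : v = e
    · subst h1; simp [bfsScanAdj]
    · simp only [bfsScanAdj, if_neg h1]
      have hstep : ∀ st2 : PySem.Set String × List String,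
          (bfsScanAdj e vs st2 = none ↔ e ∈ v :: vs) := by
        intro st2
        rw [ih]
        constructor
        · exact fun h => by simp [h]
        · intro h
          rcases List.mem_cons.mp h with h2 | h2
          · exact absurd h2.symm h1
          · exact h2
      split_ifs with h2
      · exact hstep st
      · exact hstep _

lemma scanAdj_some (e : String) : ∀ (vs : List String) (st st' : PySem.Set String × List String),
    (∀ x ∈ st.2, x ∈ st.1) → bfsScanAdj e vs st = some st' →
    (∀ x ∈ st'.2, x ∈ st'.1) ∧
    (∀ x, x ∈ st'.1 ↔ x ∈ st.1 ∨ x ∈ vs) ∧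
    (∀ x, x ∈ st'.2 ↔ x ∈ st.2 ∨ (x ∈ vs ∧ x ∉ st.1)) := by
  intro vs
  induction vs with
  | nil =>
    intro st st' hsub h
    simp only [bfsScanAdj] at h
    injection h with h; subst h
    exact ⟨hsub, fun x => by simp, fun x => by simp⟩
  | cons v vs ih =>
    intro st st' hsub h
    by_cases h1 : v = e
    · simp [bfsScanAdj, h1] at h
    · simp only [bfsScanAdj, if_neg h1] at h
      split_ifs at h with h2
      · have hv : v ∈ st.1 := (PySem.Set.contains_iff _ _).mp h2
        obtain ⟨g1, g2, g3⟩ := ih st st' hsub h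
        refine ⟨g1, ?_, ?_⟩
        · intro x
          rw [g2 x, List.mem_cons]
          constructor
          · rintro (h3 | h3) <;> tauto
          · rintro (h3 | rfl | h3) <;> tauto
        · intro x
          rw [g3 x]
          simp only [List.mem_cons]
          constructor
          · rintro (h3 | ⟨h3, h4⟩) <;> tauto
          · rintro (h3 | ⟨rfl | h3, h4⟩) <;> tauto
      · have hv : v ∉ st.1 := fun hmem => h2 ((PySem.Set.contains_iff _ _).mpr hmem)
        have hsub2 : ∀ x ∈ (PySem.Set.add st.1 v, st.2 ++ [v]).2,
            x ∈ (PySem.Set.add st.1 v, st.2 ++ [v]).1 := by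
          intro x hx
          simp only [List.mem_append, List.mem_singleton] at hx
          rw [PySem.Set.mem_add]
          rcases hx with hx | rfl
          · exact Or.inl (hsub x hx)
          · exact Or.inr rfl
        obtain ⟨g1, g2, g3⟩ := ih _ st' hsub2 h
        refine ⟨g1, ?_, ?_⟩
        · intro x
          rw [g2 x]
          simp only [PySem.Set.mem_add, List.mem_cons]
          tauto
        · intro x
          rw [g3 x]
          simp only [PySem.Set.mem_add, List.mem_append, List.mem_cons, List.not_mem_nil,
            or_false]
          constructor
          · rintro ((h3 | rfl) | ⟨h3, h4⟩) <;> tauto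
          · rintro (h3 | ⟨h5, h4⟩)
            · tauto
            · rcases h5 with rfl | h5
              · tauto
              · by_cases hxv : x = v <;> tauto

lemma scanFrontier_none_iff (graph : List (String × List String)) (e : String) :
    ∀ (us : List String) (st : PySem.Set String × List String),
    bfsScanFrontier graph e us st = none ↔ ∃ u ∈ us, pvAdj graph u e := by
  intro us
  induction us with
  | nil => intro st; simp [bfsScanFrontier]
  | cons u us ih =>
    intro st
    have hadjL : ∀ x, x ∈ (PySem.Dict.mk graph).getD u [] ↔ pvAdj graph u x := by
      intro x
      rw [PySem.Dict.getD_eq_get?_getD]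
      rfl
    simp only [bfsScanFrontier]
    rcases hscan : bfsScanAdj e ((PySem.Dict.mk graph).getD u []) st with _ | st₁
    · have he : e ∈ (PySem.Dict.mk graph).getD u [] := (scanAdj_none_iff e _ st).mp hscan
      simp only [List.mem_cons]
      constructor
      · intro _; exact ⟨u, Or.inl rfl, (hadjL e).mp he⟩
      · intro _; trivial
    · have hne : e ∉ (PySem.Dict.mk graph).getD u [] := by
        intro hmem
        rw [← scanAdj_none_iff e _ st, hscan] at hmem
        cases hmem
      rw [ih st₁]
      simp only [List.mem_cons]
      constructor
      · rintro ⟨u2, hu2, h2⟩; exact ⟨u2, Or.inr hu2, h2⟩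
      · rintro ⟨u2, hu2 | hu2, h2⟩
        · subst hu2; exact absurd ((hadjL e).mpr h2) hne
        · exact ⟨u2, hu2, h2⟩

lemma scanFrontier_some (graph : List (String × List String)) (e : String) :
    ∀ (us : List String) (st st' : PySem.Set String × List String),
    (∀ x ∈ st.2, x ∈ st.1) → bfsScanFrontier graph e us st = some st' →
    (∀ x ∈ st'.2, x ∈ st'.1) ∧
    (∀ x, x ∈ st'.1 ↔ x ∈ st.1 ∨ ∃ u ∈ us, pvAdj graph u x) ∧
    (∀ x, x ∈ st'.2 ↔ x ∈ st.2 ∨ ((∃ u ∈ us, pvAdj graph u x) ∧ x ∉ st.1)) := by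
  intro us
  induction us with
  | nil =>
    intro st st' hsub h
    simp only [bfsScanFrontier] at h
    injection h with h; subst h
    exact ⟨hsub, fun x => by simp, fun x => by simp⟩
  | cons u us ih =>
    intro st st' hsub h
    have hadjL : ∀ x, x ∈ (PySem.Dict.mk graph).getD u [] ↔ pvAdj graph u x := by
      intro x
      rw [PySem.Dict.getD_eq_get?_getD]
      rfl
    simp only [bfsScanFrontier] at h
    rcases hscan : bfsScanAdj e ((PySem.Dict.mk graph).getD u []) st with _ | st₁ <;> rw [hscan] at h
    · cases h
    · obtain ⟨g1, g2, g3⟩ := scanAdj_some e _ st st₁ hsub hscan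
      obtain ⟨k1, k2, k3⟩ := ih st₁ st' g1 h
      have hex : ∀ x, (∃ u2 ∈ u :: us, pvAdj graph u2 x) ↔
          (x ∈ (PySem.Dict.mk graph).getD u [] ∨ ∃ u2 ∈ us, pvAdj graph u2 x) := by
        intro x
        simp only [List.mem_cons]
        constructor
        · rintro ⟨u2, rfl | hu2, h2⟩
          · exact Or.inl ((hadjL x).mpr h2)
          · exact Or.inr ⟨u2, hu2, h2⟩
        · rintro (h2 | ⟨u2, hu2, h2⟩)
          · exact ⟨u, Or.inl rfl, (hadjL x).mp h2⟩
          · exact ⟨u2, Or.inr hu2, h2⟩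
      refine ⟨k1, ?_, ?_⟩
      · intro x
        rw [k2 x, g2 x, hex x]
        tauto
      · intro x
        rw [k3 x, g3 x, g2 x, hex x]
        constructor
        · rintro ((h2 | ⟨h2, h3⟩) | ⟨h2, h3⟩) <;> tauto
        · rintro (h2 | ⟨h2 | h2, h3⟩) <;> by_cases hx : x ∈ (PySem.Dict.mk graph).getD u [] <;> tauto

lemma pv_mu_le (graph : List (String × List String)) (s : String) (d : Nat) (hd : 1 ≤ d)
    (frontier : List String)
    (hJ3 : ∀ v, pvW graph s v d → (∀ m, pvW graph s v m → d ≤ m) → v ∈ frontier)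
    (hfr : frontier = []) :
    ∀ n v, pvW graph s v n → (∀ m, pvW graph s v m → n ≤ m) → n ≤ d := by
  intro n
  induction n using Nat.strong_induction_on with
  | _ n ihn =>
    intro v hw hmin
    by_cases hnd : n ≤ d
    · exact hnd
    · exfalso
      push_neg at hnd
      have hn2 : 2 ≤ n := by omega
      obtain ⟨k, rfl⟩ : ∃ k, n = k + 1 := ⟨n - 1, by omega⟩
      obtain ⟨u, hwu, hadj⟩ := pvW_unsnoc (by omega) hw
      obtain ⟨k0, hk0, hk0min⟩ := pv_exists_minimal (fun m => pvW graph s u m) ⟨k, hwu⟩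
      have hle1 : k + 1 ≤ k0 + 1 := hmin _ (pvW_snoc hk0 hadj)
      have hle2 : k0 ≤ k := hk0min k hwu
      have hk0k : k0 = k := by omega
      subst hk0k
      have hkd : k0 ≤ d := ihn k0 (by omega) u hk0 hk0min
      have hkd' : k0 = d := by omega
      subst hkd'
      have : u ∈ frontier := hJ3 u hk0 hk0min
      rw [hfr] at this
      simp at this

lemma pv_dist_succ (graph : List (String × List String)) (s : String) (d : Nat) (hd : 1 ≤ d)
    (frontier : List String)
    (hJ3 : ∀ v, pvW graph s v d → (∀ m, pvW graph s v m → d ≤ m) → v ∈ frontier) :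
    ∀ v, pvW graph s v (d + 1) → (∀ m, pvW graph s v m → d + 1 ≤ m) → ∃ u ∈ frontier, pvAdj graph u v := by
  intro v hw hmin
  obtain ⟨u, hwu, hadj⟩ := pvW_unsnoc hd hw
  obtain ⟨k0, hk0, hk0min⟩ := pv_exists_minimal (fun m => pvW graph s u m) ⟨d, hwu⟩
  have hle1 : d + 1 ≤ k0 + 1 := hmin _ (pvW_snoc hk0 hadj)
  have hle2 : k0 ≤ d := hk0min d hwu
  have hk0d : k0 = d := by omega
  subst hk0d
  exact ⟨u, hJ3 u hk0 hk0min, hadj⟩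

lemma bfsLoop_spec (graph : List (String × List String)) (s e : String) :
    ∀ (fuel : Nat) (d : Nat) (visited : PySem.Set String) (frontier : List String),
    1 ≤ d →
    (∀ u ∈ frontier, pvW graph s u d ∧ ∀ m, pvW graph s u m → d ≤ m) →
    (∀ v, v ∈ visited ↔ ∃ m, m ≤ d ∧ pvW graph s v m) →
    (∀ v, pvW graph s v d → (∀ m, pvW graph s v m → d ≤ m) → v ∈ frontier) →
    (∀ m, m ≤ d → ¬ pvW graph s e m) →
    graph.length + 2 ≤ fuel + d →
    pvSpec graph s e (bfsLoop graph e fuel visited frontier (d : Int)) := by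
  intro fuel
  induction fuel with
  | zero =>
    intro d visited frontier hd hJ1 hJ2 hJ3 hJ4 hfuel
    intro n hn
    obtain ⟨p, hc, hh, hl, hlen⟩ := hn
    obtain ⟨q, hnd, hc', hh', hl', hle⟩ := pv_shorten p hc hh hl
    have hqb : q.length ≤ graph.length + 1 := pv_len_bound q hc' hnd
    exact hJ4 q.length (by omega) ⟨q, hc', hh', hl', rfl⟩
  | succ f ih =>
    intro d visited frontier hd hJ1 hJ2 hJ3 hJ4 hfuel
    rcases frontier with _ | ⟨u0, fr'⟩
    · intro n hn
      obtain ⟨n0, hn0, hn0min⟩ := pv_exists_minimal (fun m => pvW graph s e m) ⟨n, hn⟩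
      have : n0 ≤ d := pv_mu_le graph s d hd [] hJ3 rfl n0 e hn0 hn0min
      exact hJ4 n0 this hn0
    · simp only [bfsLoop]
      rcases hscan : bfsScanFrontier graph e (u0 :: fr') (visited, ([] : List String)) with _ | st'
      · -- end_ found among the neighbours of the frontier: minimal walk has exactly d + 1 nodes
        obtain ⟨u, hu, hadj⟩ := (scanFrontier_none_iff graph e (u0 :: fr') _).mp hscan
        have hwalk : pvW graph s e (d + 1) := pvW_snoc (hJ1 u hu).1 hadj
        refine ⟨d + 1, by push_cast; ring, hwalk, ?_⟩
        intro m hm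
        obtain ⟨m0, hm0, hm0min⟩ := pv_exists_minimal (fun k => pvW graph s e k) ⟨m, hm⟩
        have hm0d : ¬ m0 ≤ d := fun hle => hJ4 m0 hle hm0
        have := hm0min m hm
        omega
      · obtain ⟨visited', nxt⟩ := st'
        have hsub0 : ∀ x ∈ ((visited, ([] : List String))).2, x ∈ ((visited, ([] : List String))).1 := by
          intro x hx; simp at hx
        obtain ⟨g1, g2, g3⟩ := scanFrontier_some graph e (u0 :: fr') _ _ hsub0 hscan
        have hnotfound : ¬ ∃ u ∈ u0 :: fr', pvAdj graph u e := by
          rw [← scanFrontier_none_iff graph e (u0 :: fr') (visited, ([] : List String)), hscan]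
          simp
        have hJ4' : ∀ m, m ≤ d + 1 → ¬ pvW graph s e m := by
          intro m hmle hm
          rcases Nat.lt_or_ge m (d + 1) with hlt | hge
          · exact hJ4 m (by omega) hm
          · have hmeq : m = d + 1 := by omega
            subst hmeq
            obtain ⟨m0, hm0, hm0min⟩ := pv_exists_minimal (fun k => pvW graph s e k) ⟨d + 1, hm⟩
            rcases Nat.lt_or_ge m0 (d + 1) with h0 | h0
            · exact hJ4 m0 (by omega) hm0
            · have : m0 = d + 1 := by have := hm0min _ hm; omega
              subst this
              obtain ⟨u, hu, hadj⟩ := pv_dist_succ graph s d hd (u0 :: fr') hJ3 e hm0 hm0min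
              exact hnotfound ⟨u, hu, hadj⟩
        have hJ1' : ∀ u ∈ nxt, pvW graph s u (d + 1) ∧ ∀ m, pvW graph s u m → d + 1 ≤ m := by
          intro u hu
          have := (g3 u).mp hu
          simp only [List.not_mem_nil, false_or] at this
          obtain ⟨⟨u', hu', hadj⟩, hnv⟩ := this
          have hwalk : pvW graph s u (d + 1) := pvW_snoc (hJ1 u' hu').1 hadj
          refine ⟨hwalk, ?_⟩
          intro m hm
          by_contra hcon
          push_neg at hcon
          exact hnv ((hJ2 u).mpr ⟨m, by omega, hm⟩)
        have hJ2' : ∀ v, v ∈ visited' ↔ ∃ m, m ≤ d + 1 ∧ pvW graph s v m := by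
          intro v
          rw [show (v ∈ visited') = (v ∈ (visited', nxt).1) from rfl, g2 v]
          constructor
          · rintro (hv | ⟨u, hu, hadj⟩)
            · obtain ⟨m, hm1, hm2⟩ := (hJ2 v).mp hv
              exact ⟨m, by omega, hm2⟩
            · exact ⟨d + 1, le_refl _, pvW_snoc (hJ1 u hu).1 hadj⟩
          · rintro ⟨m, hmle, hm⟩
            obtain ⟨m0, hm0, hm0min⟩ := pv_exists_minimal (fun k => pvW graph s v k) ⟨m, hm⟩
            rcases Nat.lt_or_ge m0 (d + 1) with h0 | h0
            · exact Or.inl ((hJ2 v).mpr ⟨m0, by omega, hm0⟩)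
            · have : m0 = d + 1 := by have := hm0min _ hm; omega
              subst this
              exact Or.inr (pv_dist_succ graph s d hd (u0 :: fr') hJ3 v hm0 hm0min)
        have hJ3' : ∀ v, pvW graph s v (d + 1) → (∀ m, pvW graph s v m → d + 1 ≤ m) → v ∈ nxt := by
          intro v hw hmin
          obtain ⟨u, hu, hadj⟩ := pv_dist_succ graph s d hd (u0 :: fr') hJ3 v hw hmin
          have hnv : v ∉ visited := by
            intro hv
            obtain ⟨m, hm1, hm2⟩ := (hJ2 v).mp hv
            have := hmin m hm2
            omega
          exact (g3 v).mpr (Or.inr ⟨⟨u, hu, hadj⟩, hnv⟩)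
        have hres := ih (d + 1) visited' nxt (by omega) hJ1' hJ2' hJ3' hJ4' (by omega)
        rw [show ((d : Int) + 1) = (((d + 1 : Nat)) : Int) by push_cast; ring]
        exact hres

lemma degrees_spec_B (graph : List (String × List String)) (s e : String) :
    pvSpec graph s e (degrees_of_separation_alt graph s e) := by
  unfold degrees_of_separation_alt
  by_cases hse : s = e
  · rw [if_pos hse]
    subst hse
    exact ⟨1, rfl, pvW_one graph s, fun m hm => pvW_len_pos hm⟩
  · rw [if_neg hse]
    have h1 : ((1 : Int)) = (((1 : Nat)) : Int) := by norm_num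
    rw [h1]
    apply bfsLoop_spec graph s e (graph.length + 2) 1 _ [s] (le_refl 1)
    · intro u hu
      have hu' : u = s := by simpa using hu
      subst hu'
      exact ⟨pvW_one graph u, fun m hm => pvW_len_pos hm⟩
    · intro v
      constructor
      · intro hv
        have hv' : v = s := by
          have := (PySem.Set.mem_add PySem.Set.empty s v).mp hv
          simpa using this
        subst hv'
        exact ⟨1, le_refl _, pvW_one graph v⟩
      · rintro ⟨m, hmle, hm⟩
        have hm1 : m = 1 := by have := pvW_len_pos hm; omega
        subst hm1
        have := pvW_one_iff hm
        subst this
        rw [PySem.Set.mem_add]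
        simp [PySem.Set.empty]
    · intro v hw _
      have := pvW_one_iff hw
      simp [this]
    · intro m hmle hm
      have hm1 : m = 1 := by have := pvW_len_pos hm; omega
      subst hm1
      exact hse (pvW_one_iff hm).symm
    · omega

lemma pvSpec_unique (graph : List (String × List String)) (s e : String) (o₁ o₂ : Option Int)
    (h₁ : pvSpec graph s e o₁) (h₂ : pvSpec graph s e o₂) : o₁ = o₂ := by
  match o₁, o₂, h₁, h₂ with
  | none, none, _, _ => rfl
  | none, some z, hn, ⟨n, _, hw, _⟩ => exact absurd hw (hn n)
  | some z, none, ⟨n, _, hw, _⟩, hn => exact absurd hw (hn n)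
  | some z₁, some z₂, ⟨n₁, he₁, hw₁, hm₁⟩, ⟨n₂, he₂, hw₂, hm₂⟩ =>
    have heq : n₁ = n₂ := le_antisymm (hm₁ n₂ hw₂) (hm₂ n₁ hw₁)
    simp [he₁, he₂, heq]

-- ===== VERDICT (by name: the statement is the Claim_ definition above) =====
theorem degrees_of_separation_spec : Claim_equal_degrees_of_separation := by
  intro graph start end_ _
  unfold Spec_degrees_of_separation
  exact pvSpec_unique graph start end_ _ _ (degrees_spec_A graph start end_) (degrees_spec_B graph start end_)
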